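-- pv_equiv track=rewrite | github.com/Myriam-Thameri/taquin | test.py | move_tile
-- ===== SOURCE A (Python) =====
-- def move_tile(puzzle, next_state):
--     empty_index = None
--     new_index = None
--
--     for i, row in enumerate(puzzle):
--         if 0 in row:
--             empty_index = [i, row.index(0)]
--             break
--
--     for i, row in enumerate(next_state):
--         if 0 in row:
--             new_index = [i, row.index(0)]
--             break
--     dx = new_index[0] - empty_index[0]
--     dy = new_index[1] - empty_index[1]
--
--     if dx == 0 and dy == 1:
--         puzzle[empty_index[0]][empty_index[1]], puzzle[empty_index[0]][empty_index[1] + 1] = puzzle[empty_index[0]][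
--             empty_index[1] + 1], puzzle[empty_index[0]][empty_index[1]]
--     elif dx == 0 and dy == -1:
--         puzzle[empty_index[0]][empty_index[1]], puzzle[empty_index[0]][empty_index[1] - 1] = puzzle[empty_index[0]][
--             empty_index[1] - 1], puzzle[empty_index[0]][empty_index[1]]
--     elif dx == 1 and dy == 0:
--         puzzle[empty_index[0]][empty_index[1]], puzzle[empty_index[0] + 1][empty_index[1]] = puzzle[empty_index[0] + 1][
--             empty_index[1]], puzzle[empty_index[0]][empty_index[1]]
--     elif dx == -1 and dy == 0:
--         puzzle[empty_index[0]][empty_index[1]], puzzle[empty_index[0] - 1][empty_index[1]] = puzzle[empty_index[0] - 1][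
--             empty_index[1]], puzzle[empty_index[0]][empty_index[1]]
--     else:
--         raise ValueError("Invalid move!")
--
--     return puzzle
-- ===== SOURCE B (Python) =====
-- # B: find both blanks, check the move is a unit step, and rebuild the grid with one
-- # position-indexed comprehension instead of A's four in-place swap branches.
-- # Note: A mutates `puzzle` in place; B leaves it untouched and returns a fresh grid
-- # (the equivalence claimed is about the return value only).
--
-- def move_tile(puzzle, next_state):
--     def blank(grid):
--         return next((i, row.index(0)) for i, row in enumerate(grid) if 0 in row)
--
--     ei, ej = blank(puzzle)
--     ni, nj = blank(next_state)
--     dx, dy = ni - ei, nj - ej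
--     if abs(dx) + abs(dy) != 1:
--         raise ValueError("Invalid move!")
--     moved = puzzle[ei + dx][ej + dy]
--     blank_val = puzzle[ei][ej]
--     return [
--         [blank_val if (i, j) == (ei + dx, ej + dy) else
--          moved if (i, j) == (ei, ej) else v
--          for j, v in enumerate(row)]
--         for i, row in enumerate(puzzle)
--     ]
-- ===== Notes on version B (the rewrite author's own statement) =====
-- stated objective: simpler
-- what changed: B finds both blank positions with one shared next()/enumerate helper, replaces A's four explicit direction branches and in-place tuple-assignment swaps by a single abs(dx)+abs(dy)==1 test, and returns a fresh grid built by one position-indexed comprehension instead of mutating puzzle.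
import Mathlib
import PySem

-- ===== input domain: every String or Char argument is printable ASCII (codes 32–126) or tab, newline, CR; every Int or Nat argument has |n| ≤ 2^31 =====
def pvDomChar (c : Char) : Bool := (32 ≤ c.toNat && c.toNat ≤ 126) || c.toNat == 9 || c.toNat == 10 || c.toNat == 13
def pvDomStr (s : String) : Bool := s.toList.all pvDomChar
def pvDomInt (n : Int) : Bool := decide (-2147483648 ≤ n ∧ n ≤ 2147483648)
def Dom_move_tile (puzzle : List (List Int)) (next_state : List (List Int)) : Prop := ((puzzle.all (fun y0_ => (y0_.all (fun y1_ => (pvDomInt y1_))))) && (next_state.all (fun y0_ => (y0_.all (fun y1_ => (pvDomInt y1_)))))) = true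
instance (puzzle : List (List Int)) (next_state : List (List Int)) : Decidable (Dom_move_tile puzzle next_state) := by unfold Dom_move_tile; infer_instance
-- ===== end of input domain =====

-- B replaces A's four-branch in-place neighbour swap with one |dx|+|dy| = 1 test and a single
-- position-indexed rebuild of the grid (objective: simpler). Python A mutates `puzzle` in place
-- and returns it; B returns a fresh grid — the equivalence proved is about the return value.

-- ===== PORT A =====
-- A's first loop (and, identically, its second): scan rows, stop at the first row containing 0,
-- return [i, row.index(0)].
def mtFindLoop : Nat → List (List Int) → Option (Nat × Nat)
  | _, [] => none
  | i, row :: rest =>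
    if row.contains 0 then some (i, (PySem.List.index? row 0).getD 0)
    else mtFindLoop (i + 1) rest

def move_tile (puzzle : List (List Int)) (next_state : List (List Int)) : List (List Int) :=
  match mtFindLoop 0 puzzle, mtFindLoop 0 next_state with
  | some (ei, ej), some (ni, nj) =>
    let dx : Int := (ni : Int) - (ei : Int)
    let dy : Int := (nj : Int) - (ej : Int)
    if dx = 0 ∧ dy = 1 then
      let r := puzzle.getD ei []
      puzzle.set ei ((r.set ej (r.getD (ej + 1) 0)).set (ej + 1) (r.getD ej 0))
    else if dx = 0 ∧ dy = -1 then
      let r := puzzle.getD ei []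
      puzzle.set ei ((r.set ej (r.getD (ej - 1) 0)).set (ej - 1) (r.getD ej 0))
    else if dx = 1 ∧ dy = 0 then
      let rE := puzzle.getD ei []
      let rO := puzzle.getD (ei + 1) []
      (puzzle.set ei (rE.set ej (rO.getD ej 0))).set (ei + 1) (rO.set ej (rE.getD ej 0))
    else if dx = -1 ∧ dy = 0 then
      let rE := puzzle.getD ei []
      let rO := puzzle.getD (ei - 1) []
      (puzzle.set ei (rE.set ej (rO.getD ej 0))).set (ei - 1) (rO.set ej (rE.getD ej 0))
    else puzzle    -- raise ValueError("Invalid move!"): excluded by Pre_move_tile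
  | _, _ => puzzle -- empty_index/new_index stays None → TypeError: excluded by Pre_move_tile

-- ===== PORT B =====
-- Source B's `blank`: next((i, row.index(0)) for i, row in enumerate(grid) if 0 in row)
def altBlank (grid : List (List Int)) : Option (Int × Int) :=
  (PySem.List.enumerate grid 0).findSome? (fun p =>
    if p.2.contains 0 then some (p.1, ((PySem.List.index? p.2 0).getD 0 : Nat) ) else none)

def move_tile_alt (puzzle : List (List Int)) (next_state : List (List Int)) : List (List Int) :=
  match altBlank puzzle with
  | none => puzzle -- StopIteration from next(): excluded by Pre_move_tile
  | some (ei, ej) =>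
  match altBlank next_state with
  | none => puzzle -- StopIteration from next(): excluded by Pre_move_tile
  | some (ni, nj) =>
    let dx := ni - ei
    let dy := nj - ej
    if dx.natAbs + dy.natAbs ≠ 1 then puzzle   -- raise ValueError("Invalid move!"): excluded by Pre_move_tile
    else
      let moved := PySem.List.pyGetD (PySem.List.pyGetD puzzle (ei + dx) []) (ej + dy) 0
      let blankVal := PySem.List.pyGetD (PySem.List.pyGetD puzzle ei []) ej 0
      (PySem.List.enumerate puzzle 0).map (fun p =>
        (PySem.List.enumerate p.2 0).map (fun q =>
          if (p.1, q.1) = (ei + dx, ej + dy) then blankVal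
          else if (p.1, q.1) = (ei, ej) then moved
          else q.2))

-- ===== PRECONDITION & SPEC =====
-- position of the first 0 (first such row, first such column), used only to STATE the precondition
def blankIdx (g : List (List Int)) : Option (Nat × Nat) :=
  (g.findIdx? (fun row => row.contains 0)).map (fun i => (i, (g.getD i []).idxOf 0))

-- Pre_ holds exactly where Python A returns normally: both grids contain a 0, the two blank
-- positions are one orthogonal step apart, and the new blank position is a valid cell of puzzle
-- (otherwise A raises TypeError / ValueError("Invalid move!") / IndexError).
def Pre_move_tile (puzzle : List (List Int)) (next_state : List (List Int)) : Prop :=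
  ((blankIdx puzzle).elim false (fun e =>
    (blankIdx next_state).elim false (fun n =>
      decide ((e.1 = n.1 ∧ (n.2 = e.2 + 1 ∨ n.2 + 1 = e.2)) ∨
              (e.2 = n.2 ∧ (n.1 = e.1 + 1 ∨ n.1 + 1 = e.1))) &&
      decide (n.1 < puzzle.length) && decide (n.2 < (puzzle.getD n.1 []).length)))) = true

instance (puzzle : List (List Int)) (next_state : List (List Int)) : Decidable (Pre_move_tile puzzle next_state) := by unfold Pre_move_tile; infer_instance

def pvWitness_move_tile : List (List Int) × List (List Int) := ([[1, 0], [2, 3]], [[0, 1], [2, 3]])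

def Spec_move_tile (puzzle : List (List Int)) (next_state : List (List Int)) (out : List (List Int)) : Prop := out = move_tile_alt puzzle next_state
instance (puzzle : List (List Int)) (next_state : List (List Int)) (out : List (List Int)) : Decidable (Spec_move_tile puzzle next_state out) := by unfold Spec_move_tile; infer_instance

-- ===== CLAIM (what is proved, stated in full; the proofs are below) =====
def Claim_equal_move_tile : Prop := ∀ (puzzle : List (List Int)) (next_state : List (List Int)), Dom_move_tile puzzle next_state → Pre_move_tile puzzle next_state → Spec_move_tile puzzle next_state (move_tile puzzle next_state)

-- ===== LEMMAS AND PROOFS =====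

theorem idxOf?_of_mem (l : List Int) (h : (0:Int) ∈ l) : l.idxOf? 0 = some (l.idxOf 0) := by
  simp only [List.idxOf?, List.idxOf]
  rw [List.findIdx?_eq_some_iff_findIdx_eq]
  exact ⟨List.findIdx_lt_length.mpr ⟨0, h, by simp⟩, rfl⟩

-- A's scan equals blankIdx (shifted by the running start index)
theorem mtFindLoop_eq (g : List (List Int)) (s : Nat) :
    mtFindLoop s g = (blankIdx g).map (fun p => (s + p.1, p.2)) := by
  induction g generalizing s with
  | nil => simp [mtFindLoop, blankIdx]
  | cons row rest ih =>
    by_cases hm : (0:Int) ∈ row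
    · simp [mtFindLoop, blankIdx, hm, List.findIdx?_cons,
        PySem.List.index?_eq_idxOf?, idxOf?_of_mem row hm]
    · simp only [mtFindLoop, blankIdx, List.findIdx?_cons] at *
      simp only [List.contains_eq_mem, hm, decide_false, if_false, Bool.false_eq_true, ih (s+1)]
      cases hf : List.findIdx? (fun row => row.contains 0) rest with
      | none => simp only [List.contains_eq_mem] at hf; rw [hf]; rfl
      | some i =>
        simp only [List.contains_eq_mem] at hf
        rw [hf]; simp; omega

-- B's scan equals blankIdx (coordinates as Int), generalized over the enumerate start
theorem altBlankAux (g : List (List Int)) (s : Nat) :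
    (PySem.List.enumerate g (s : Int)).findSome? (fun p =>
      if p.2.contains 0 then some (p.1, (((PySem.List.index? p.2 0).getD 0 : Nat) : Int)) else none)
    = (blankIdx g).map (fun p => (((s + p.1 : Nat) : Int), (p.2 : Int))) := by
  induction g generalizing s with
  | nil => simp [blankIdx]
  | cons row rest ih =>
    rw [PySem.List.enumerate_cons]
    by_cases hm : (0:Int) ∈ row
    · simp [blankIdx, hm, List.findIdx?_cons,
        PySem.List.index?_eq_idxOf?, idxOf?_of_mem row hm]
    · rw [List.findSome?_cons]
      have hm' : row.contains 0 = false := by simpa using hm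
      have hcast : ((s : Int) + 1) = ((s + 1 : Nat) : Int) := by push_cast; ring
      simp only [hm', Bool.false_eq_true, if_false, hcast, ih (s + 1), blankIdx,
        List.findIdx?_cons]
      cases hf : List.findIdx? (fun row => row.contains 0) rest with
      | none => rfl
      | some i => simp; omega

theorem altBlank_eq (g : List (List Int)) :
    altBlank g = (blankIdx g).map (fun p => ((p.1 : Int), (p.2 : Int))) := by
  have := altBlankAux g 0
  simpa [altBlank] using this

-- the first-blank position is a valid cell
theorem blankIdx_lt (g : List (List Int)) (i j : Nat) (h : blankIdx g = some (i, j)) :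
    i < g.length ∧ j < (g.getD i []).length := by
  unfold blankIdx at h
  cases hf : g.findIdx? (fun row => row.contains 0) with
  | none => rw [hf] at h; simp at h
  | some i' =>
    rw [hf] at h
    simp only [Option.map_some, Option.some.injEq, Prod.mk.injEq] at h
    obtain ⟨rfl, rfl⟩ := h
    obtain ⟨hlt, hidx⟩ := List.findIdx?_eq_some_iff_findIdx_eq.mp hf
    refine ⟨hlt, ?_⟩
    have hmem : (0:Int) ∈ g[i'] := by
      have hw : List.findIdx (fun row => row.contains 0) g < g.length := hidx ▸ hlt
      have hp := List.findIdx_getElem (w := hw)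
      have hg : g[i'] = g[List.findIdx (fun row => row.contains 0) g] := by
        congr 1; exact hidx.symm
      rw [hg]
      simpa using hp
    rw [List.getD_eq_getElem g [] hlt]
    exact List.idxOf_lt_length_of_mem hmem

-- B's rebuild with the two swapped cells in the same row equals A's double set
theorem rebuild_same_row (g : List (List Int)) (i0 j1 j2 : Nat) (a b : Int)
    (hi : i0 < g.length) (hj1 : j1 < (g.getD i0 []).length) (hj2 : j2 < (g.getD i0 []).length)
    (hne : j1 ≠ j2) :
    (PySem.List.enumerate g 0).map (fun p =>
        (PySem.List.enumerate p.2 0).map (fun q =>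
          if (p.1, q.1) = ((i0 : Int), (j2 : Int)) then b
          else if (p.1, q.1) = ((i0 : Int), (j1 : Int)) then a
          else q.2))
      = g.set i0 (((g.getD i0 []).set j1 a).set j2 b) := by
  have hrow : g.getD i0 [] = g[i0] := List.getD_eq_getElem g [] hi
  rw [hrow] at hj1 hj2 ⊢
  apply List.ext_getElem
  · simp [PySem.List.length_enumerate]
  · intro i hi1 hi2
    simp only [List.getElem_map, PySem.List.getElem_enumerate, List.getElem_set, zero_add]
    apply List.ext_getElem
    · simp only [List.length_map, PySem.List.length_enumerate]
      split_ifs with h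
      · subst h; simp
      · rfl
    · intro j hj hj'
      simp only [List.getElem_map, PySem.List.getElem_enumerate, zero_add, Prod.mk.injEq,
        Nat.cast_inj]
      split_ifs with h1 h2 h3 h4 h5
      · obtain ⟨rfl, rfl⟩ := h1
        simp
      · exact absurd h1.1.symm h2
      · obtain ⟨rfl, rfl⟩ := h3
        simp [Ne.symm hne]
      · exact absurd h3.1.symm h4
      · subst h5
        have t2 : j ≠ j2 := fun hc => h1 ⟨rfl, hc⟩
        have t1 : j ≠ j1 := fun hc => h3 ⟨rfl, hc⟩
        simp [Ne.symm t2, Ne.symm t1]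
      · rfl

-- B's rebuild with the two swapped cells in the same column of adjacent rows equals A's two sets
theorem rebuild_cross_row (g : List (List Int)) (i1 i2 j : Nat) (a b : Int)
    (hi1 : i1 < g.length) (hi2 : i2 < g.length)
    (hj1 : j < (g.getD i1 []).length) (hj2 : j < (g.getD i2 []).length)
    (hne : i1 ≠ i2) :
    (PySem.List.enumerate g 0).map (fun p =>
        (PySem.List.enumerate p.2 0).map (fun q =>
          if (p.1, q.1) = ((i2 : Int), (j : Int)) then b
          else if (p.1, q.1) = ((i1 : Int), (j : Int)) then a
          else q.2))
      = (g.set i1 ((g.getD i1 []).set j a)).set i2 ((g.getD i2 []).set j b) := by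
  have hr1 : g.getD i1 [] = g[i1] := List.getD_eq_getElem g [] hi1
  have hr2 : g.getD i2 [] = g[i2] := List.getD_eq_getElem g [] hi2
  rw [hr1] at hj1; rw [hr2] at hj2; rw [hr1, hr2]
  apply List.ext_getElem
  · simp [PySem.List.length_enumerate]
  · intro i hli1 hli2
    have hg : i < g.length := by simpa [PySem.List.length_enumerate] using hli1
    simp only [List.getElem_map, PySem.List.getElem_enumerate, List.getElem_set, zero_add]
    apply List.ext_getElem
    · simp only [List.length_map, PySem.List.length_enumerate]
      split_ifs with h h'
      · subst h; simp
      · subst h'; simp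
      · rfl
    · intro k hk hk'
      simp only [List.getElem_map, PySem.List.getElem_enumerate, zero_add, Prod.mk.injEq,
        Nat.cast_inj]
      by_cases e2 : i = i2
      · subst e2
        by_cases ek : k = j
        · subst ek; simp
        · simp [ek, Ne.symm ek]
      · have e2' : ¬ i2 = i := fun h => e2 h.symm
        by_cases e1 : i = i1
        · subst e1
          by_cases ek : k = j
          · subst ek; simp [e2', hne]
          · simp [e2', ek, Ne.symm ek, hne]
        · have e1' : ¬ i1 = i := fun h => e1 h.symm
          simp [e1, e2, e1', e2']

-- ===== VERDICT (by name: the statement is the Claim_ definition above) =====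
theorem move_tile_spec : Claim_equal_move_tile := by
  intro puzzle next_state _ hpre
  unfold Spec_move_tile
  unfold Pre_move_tile at hpre
  cases hfp : blankIdx puzzle with
  | none => rw [hfp] at hpre; simp at hpre
  | some p =>
  cases hfn : blankIdx next_state with
  | none => rw [hfp, hfn] at hpre; simp at hpre
  | some q =>
  obtain ⟨ei, ej⟩ := p
  obtain ⟨ni, nj⟩ := q
  rw [hfp, hfn] at hpre
  simp only [Option.elim_some, Bool.and_eq_true, decide_eq_true_eq] at hpre
  obtain ⟨⟨hmove, hni⟩, hnj⟩ := hpre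
  obtain ⟨hei, hej⟩ := blankIdx_lt puzzle ei ej hfp
  unfold move_tile move_tile_alt
  rw [mtFindLoop_eq puzzle 0, mtFindLoop_eq next_state 0,
      altBlank_eq puzzle, altBlank_eq next_state, hfp, hfn]
  simp only [Option.map_some, Nat.zero_add]
  rcases hmove with ⟨rfl, hcol⟩ | ⟨rfl, hrow⟩
  · -- same row: ei = ni, nj = ej + 1 or ej = nj + 1
    rcases hcol with rfl | rfl
    · -- dy = 1 : nj = ej + 1
      rw [if_pos (by constructor <;> push_cast <;> ring)]
      rw [if_neg (by omega)]
      have hcast1 : ((ei : Int) + ((ei : Int) - (ei : Int))) = ((ei : Nat) : Int) := by ring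
      have hcast2 : ((ej : Int) + (((ej + 1 : Nat) : Int) - (ej : Int))) = (((ej + 1 : Nat)) : Int) := by
        push_cast; ring
      rw [hcast1, hcast2]
      simp only [PySem.List.pyGetD_natCast]
      exact (rebuild_same_row puzzle ei ej (ej + 1)
        ((puzzle.getD ei []).getD (ej + 1) 0) ((puzzle.getD ei []).getD ej 0)
        hei hej hnj (by omega)).symm
    · -- dy = -1 : ej = nj + 1
      rw [if_neg (by omega)]
      rw [if_pos (by constructor <;> push_cast <;> ring)]
      rw [if_neg (by omega)]
      have hcast1 : ((ei : Int) + ((ei : Int) - (ei : Int))) = ((ei : Nat) : Int) := by ring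
      have hcast2 : (((nj + 1 : Nat) : Int) + ((nj : Int) - ((nj + 1 : Nat) : Int))) = ((nj : Nat) : Int) := by
        push_cast; ring
      rw [hcast1, hcast2]
      simp only [PySem.List.pyGetD_natCast, Nat.add_sub_cancel]
      exact (rebuild_same_row puzzle ei (nj + 1) nj
        ((puzzle.getD ei []).getD nj 0) ((puzzle.getD ei []).getD (nj + 1) 0)
        hei hej hnj (by omega)).symm
  · -- same column: ej = nj, ni = ei + 1 or ei = ni + 1
    rcases hrow with rfl | rfl
    · -- dx = 1 : ni = ei + 1
      rw [if_neg (by omega)]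
      rw [if_neg (by omega)]
      rw [if_pos (by constructor <;> push_cast <;> ring)]
      rw [if_neg (by omega)]
      have hcast1 : ((ei : Int) + (((ei + 1 : Nat) : Int) - (ei : Int))) = (((ei + 1 : Nat)) : Int) := by
        push_cast; ring
      have hcast2 : ((ej : Int) + ((ej : Int) - (ej : Int))) = ((ej : Nat) : Int) := by ring
      rw [hcast1, hcast2]
      simp only [PySem.List.pyGetD_natCast]
      exact (rebuild_cross_row puzzle ei (ei + 1) ej
        ((puzzle.getD (ei + 1) []).getD ej 0) ((puzzle.getD ei []).getD ej 0)
        hei hni hej hnj (by omega)).symm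
    · -- dx = -1 : ei = ni + 1
      rw [if_neg (by omega)]
      rw [if_neg (by omega)]
      rw [if_neg (by omega)]
      rw [if_pos (by constructor <;> push_cast <;> ring)]
      rw [if_neg (by omega)]
      have hcast1 : (((ni + 1 : Nat) : Int) + ((ni : Int) - ((ni + 1 : Nat) : Int))) = ((ni : Nat) : Int) := by
        push_cast; ring
      have hcast2 : ((ej : Int) + ((ej : Int) - (ej : Int))) = ((ej : Nat) : Int) := by ring
      rw [hcast1, hcast2]
      simp only [PySem.List.pyGetD_natCast, Nat.add_sub_cancel]
      exact (rebuild_cross_row puzzle (ni + 1) ni ej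
        ((puzzle.getD ni []).getD ej 0) ((puzzle.getD (ni + 1) []).getD ej 0)
        hei hni hej hnj (by omega)).symm
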